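-- pv_equiv track=rewrite | github.com/Semih1997/CodingBat-Java-Problems-in-Python | Codingbat String-2/QgetSandwich.py | getSandwich
-- ===== SOURCE A (Python) =====
-- def getSandwich(a):
--     bread_list = []
--     sandwich_type = ""
--     if len(a) > 5 and "bread" in a:
--         for x in range(len(a)):
--             if a[x:x+5] == "bread":
--                 bread_list.append(x)
--         sandwich_type = a[bread_list[0]+5:bread_list[len(bread_list)-1]]
--     return sandwich_type
-- ===== SOURCE B (Python) =====
-- def getSandwich(a):
--     if len(a) > 5 and "bread" in a:
--         return a[a.find("bread") + 5 : a.rfind("bread")]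
--     return ""
-- ===== Notes on version B (the rewrite author's own statement) =====
-- stated objective: simpler
-- what changed: B drops the pass that collects every occurrence index into a list and instead computes only the two boundaries with str.find and str.rfind, slicing between them directly.
import Mathlib
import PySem

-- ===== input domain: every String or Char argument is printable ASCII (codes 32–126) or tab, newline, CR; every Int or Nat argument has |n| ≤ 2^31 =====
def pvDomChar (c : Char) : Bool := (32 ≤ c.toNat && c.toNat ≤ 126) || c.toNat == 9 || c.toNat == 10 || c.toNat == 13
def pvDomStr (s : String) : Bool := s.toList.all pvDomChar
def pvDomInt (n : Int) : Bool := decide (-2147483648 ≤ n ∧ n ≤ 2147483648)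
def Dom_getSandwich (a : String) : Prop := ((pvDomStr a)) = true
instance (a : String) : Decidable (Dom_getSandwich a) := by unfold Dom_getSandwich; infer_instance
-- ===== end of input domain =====

-- B drops A's pass that collects every occurrence index of "bread" into a list and instead
-- computes only the two boundaries with str.find / str.rfind (objective: simpler).

-- ===== PORT A =====
def getSandwich (a : String) : String :=
  -- bread_list = []; sandwich_type = ""; if len(a) > 5 and "bread" in a: …
  if 5 < PySem.Str.len a ∧ PySem.Str.isIn "bread" a = true then
    -- for x in range(len(a)): if a[x:x+5] == "bread": bread_list.append(x)
    let breadList : List Int :=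
      (PySem.List.pyRange 0 (PySem.Str.len a) 1).foldl
        (fun acc x => if PySem.Str.slice a (some x) (some (x + 5)) == "bread" then acc ++ [x] else acc) []
    -- a[bread_list[0]+5 : bread_list[len(bread_list)-1]]; the guard guarantees bread_list ≠ [],
    -- so Python's indexing cannot raise and pyGetD's default is never used
    PySem.Str.slice a (some (PySem.List.pyGetD breadList 0 0 + 5))
      (some (PySem.List.pyGetD breadList ((breadList.length : Int) - 1) 0))
  else ""

-- ===== PORT B =====
def getSandwich_alt (a : String) : String :=
  if 5 < PySem.Str.len a ∧ PySem.Str.isIn "bread" a = true then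
    PySem.Str.slice a (some (PySem.Str.find a "bread" + 5)) (some (PySem.Str.rfind a "bread"))
  else ""

-- ===== PRECONDITION & SPEC =====
def Spec_getSandwich (a : String) (out : String) : Prop := out = getSandwich_alt a
instance (a : String) (out : String) : Decidable (Spec_getSandwich a out) := by unfold Spec_getSandwich; infer_instance

-- ===== CLAIM (what is proved, stated in full; the proofs are below) =====
def Claim_equal_getSandwich : Prop := ∀ (a : String), Dom_getSandwich a → Spec_getSandwich a (getSandwich a)

-- ===== LEMMAS AND PROOFS =====

-- rfind.go s sub k scans j = k, k-1, …, 0 and returns the first j with sub a prefix of s.drop j.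
theorem pvRfindGo_spec (s sub : List Char) (k : Nat)
    (h : ∃ j ≤ k, sub <+: s.drop j) :
    0 ≤ PySem.Chars.rfind.go s sub k ∧
    (PySem.Chars.rfind.go s sub k).toNat ≤ k ∧
    sub <+: s.drop (PySem.Chars.rfind.go s sub k).toNat ∧
    ∀ j, (PySem.Chars.rfind.go s sub k).toNat < j → j ≤ k → ¬ sub <+: s.drop j := by
  induction k with
  | zero =>
    obtain ⟨j, hj, hp⟩ := h
    have hj0 : j = 0 := Nat.le_zero.mp hj
    subst hj0
    have hgo : PySem.Chars.rfind.go s sub 0 = if sub.isPrefixOf s then 0 else -1 := rfl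
    have hpre : sub.isPrefixOf s = true := List.isPrefixOf_iff_prefix.mpr (by simpa using hp)
    rw [hgo, if_pos hpre]
    refine ⟨by norm_num, by norm_num, by simpa using hp, ?_⟩
    intro j hj1 hj2; omega
  | succ k ih =>
    have hgo : PySem.Chars.rfind.go s sub (k+1)
        = if sub.isPrefixOf (s.drop (k+1)) then ((k : Int)+1) else PySem.Chars.rfind.go s sub k := rfl
    by_cases hp : sub.isPrefixOf (s.drop (k+1)) = true
    · rw [hgo, if_pos hp]
      have htn : ((k : Int) + 1).toNat = k + 1 := by omega
      refine ⟨by positivity, by omega, ?_, ?_⟩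
      · rw [htn]; exact List.isPrefixOf_iff_prefix.mp hp
      · intro j hj1 hj2; omega
    · rw [hgo, if_neg hp]
      have h' : ∃ j ≤ k, sub <+: s.drop j := by
        obtain ⟨j, hj, hpj⟩ := h
        rcases Nat.lt_or_ge j (k+1) with hlt | hge
        · exact ⟨j, by omega, hpj⟩
        · have : j = k + 1 := by omega
          subst this
          exact absurd (List.isPrefixOf_iff_prefix.mpr hpj) hp
      obtain ⟨h1, h2, h3, h4⟩ := ih h'
      refine ⟨h1, by omega, h3, ?_⟩
      intro j hj1 hj2
      rcases Nat.lt_or_ge j (k+1) with hlt | hge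
      · exact h4 j hj1 (by omega)
      · have : j = k + 1 := by omega
        subst this
        exact fun hpj => hp (List.isPrefixOf_iff_prefix.mpr hpj)

-- a[x:x+5] == "bread"  ↔  "bread" is a prefix of a.toList.drop x.toNat (for 0 ≤ x)
theorem pvSlice_eq_bread_iff (a : String) (x : Int) (hx : 0 ≤ x) :
    ((PySem.Str.slice a (some x) (some (x + 5)) == "bread") = true)
      ↔ "bread".toList <+: a.toList.drop x.toNat := by
  rw [beq_iff_eq]
  constructor
  · intro h
    have hl : (PySem.Str.slice a (some x) (some (x + 5))).toList = "bread".toList := by rw [h]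
    rw [PySem.Str.toList_slice, PySem.Chars.slice_eq_listSlice,
        PySem.List.slice_toNat _ hx (by omega)] at hl
    have h5 : (x + 5).toNat - x.toNat = 5 := by omega
    rw [h5] at hl
    rw [List.prefix_iff_eq_take]
    simpa using hl.symm
  · intro h
    have hl := List.prefix_iff_eq_take.mp h
    have : (PySem.Str.slice a (some x) (some (x + 5))).toList = "bread".toList := by
      rw [PySem.Str.toList_slice, PySem.Chars.slice_eq_listSlice,
          PySem.List.slice_toNat _ hx (by omega)]
      have h5 : (x + 5).toNat - x.toNat = 5 := by omega
      rw [h5]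
      simpa using hl.symm
    exact String.ext (by simpa [String.toList] using this)

-- first collected index = find
theorem pvHead_eq (a : String) (hin : PySem.Str.isIn "bread" a = true) :
    PySem.List.pyGetD
      ((PySem.List.pyRange 0 (PySem.Str.len a) 1).filter
        (fun x => PySem.Str.slice a (some x) (some (x + 5)) == "bread")) 0 0
      = PySem.Str.find a "bread" := by
  set p : Int → Bool := fun x => PySem.Str.slice a (some x) (some (x + 5)) == "bread" with hp
  have hinf : "bread".toList <:+: a.toList := (PySem.Str.isIn_iff_infix _ _).mp hin
  set F : Int := PySem.Chars.find a.toList "bread".toList with hF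
  have hF0 : 0 ≤ F := (PySem.Chars.find_nonneg_iff _ _).mpr hinf
  obtain ⟨hFpre, hFmin⟩ := PySem.Chars.find_spec hF0
  have hlen5 : ("bread".toList).length ≤ (a.toList.drop F.toNat).length := hFpre.length_le
  have hFn : F < (a.toList.length : Int) := by
    simp only [List.length_drop] at hlen5
    have : ("bread".toList).length = 5 := by decide
    omega
  have hlenEq : PySem.Str.len a = (a.toList.length : Int) := by
    simp [PySem.Str.len_eq]
  rw [hlenEq,
      PySem.List.pyRange_one_append 0 F _ hF0 (le_of_lt hFn), List.filter_append,
      PySem.List.pyRange_one_cons hFn]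
  have hfilt : (PySem.List.pyRange 0 F).filter p = [] := by
    rw [List.filter_eq_nil_iff]
    intro x hx
    have hxb := PySem.List.mem_pyRange_one.mp hx
    have : ¬ "bread".toList <+: a.toList.drop x.toNat := hFmin x.toNat (by omega)
    simpa [hp] using fun hc => this ((pvSlice_eq_bread_iff a x hxb.1).mp hc)
  have hpF : p F = true := (pvSlice_eq_bread_iff a F hF0).mpr hFpre
  rw [hfilt, List.nil_append, List.filter_cons, if_pos hpF,
      PySem.List.pyGetD_zero_cons]
  simp [PySem.Str.find, hF]

-- last collected index = rfind
theorem pvLast_eq (a : String) (hin : PySem.Str.isIn "bread" a = true) :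
    (PySem.List.pyGetD
      ((PySem.List.pyRange 0 (PySem.Str.len a) 1).filter
        (fun x => PySem.Str.slice a (some x) (some (x + 5)) == "bread"))
      ((((PySem.List.pyRange 0 (PySem.Str.len a) 1).filter
        (fun x => PySem.Str.slice a (some x) (some (x + 5)) == "bread")).length : Int) - 1) 0)
      = PySem.Str.rfind a "bread" := by
  set p : Int → Bool := fun x => PySem.Str.slice a (some x) (some (x + 5)) == "bread" with hp
  have hinf : "bread".toList <:+: a.toList := (PySem.Str.isIn_iff_infix _ _).mp hin
  set n : Nat := a.toList.length with hn
  have hex : ∃ j ≤ n, "bread".toList <+: a.toList.drop j := by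
    obtain ⟨j, hj⟩ := (PySem.Chars.exists_prefix_drop_iff_isIn "bread".toList a.toList).mpr
      (by rw [← PySem.Str.isIn_eq]; exact hin)
    rcases Nat.lt_or_ge n j with hlt | hle
    · exfalso
      have : a.toList.drop j = [] := List.drop_eq_nil_of_le (by omega)
      rw [this] at hj
      have := hj.length_le
      simp at this
    · exact ⟨j, hle, hj⟩
  have hRdef : PySem.Chars.rfind a.toList "bread".toList
      = PySem.Chars.rfind.go a.toList "bread".toList n := rfl
  obtain ⟨hR0, hRle, hRpre, hRmax⟩ := pvRfindGo_spec a.toList "bread".toList n hex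
  set R : Int := PySem.Chars.rfind.go a.toList "bread".toList n with hR
  have hlen5 : ("bread".toList).length ≤ (a.toList.drop R.toNat).length := hRpre.length_le
  have hRn : R < (n : Int) := by
    simp only [List.length_drop] at hlen5
    have : ("bread".toList).length = 5 := by decide
    omega
  have hlenEq : PySem.Str.len a = (n : Int) := by simp [PySem.Str.len_eq, hn]
  rw [hlenEq,
      PySem.List.pyRange_one_append 0 (R + 1) _ (by omega) (by omega), List.filter_append]
  have hfilt2 : (PySem.List.pyRange (R + 1) (n : Int)).filter p = [] := by
    rw [List.filter_eq_nil_iff]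
    intro x hx
    have hxb := PySem.List.mem_pyRange_one.mp hx
    have hnp : ¬ "bread".toList <+: a.toList.drop x.toNat := hRmax x.toNat (by omega) (by omega)
    simpa [hp] using fun hc => hnp ((pvSlice_eq_bread_iff a x (by omega)).mp hc)
  have hpR : p R = true := (pvSlice_eq_bread_iff a R hR0).mpr hRpre
  rw [PySem.List.pyRange_one_succ_right hR0, List.filter_append, hfilt2, List.append_nil,
      List.filter_cons, if_pos hpR]
  simp only [List.filter_nil]
  set t : List Int := (PySem.List.pyRange 0 R).filter p with ht
  have hidx : ((t ++ [R]).length : Int) - 1 = (t.length : Nat) := by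
    simp
  rw [hidx, PySem.List.pyGetD_natCast]
  have : (t ++ [R]).getD t.length 0 = R := by
    simp [List.getD]
  rw [this]
  simp only [PySem.Str.rfind]
  exact hRdef.symm

-- ===== VERDICT (by name: the statement is the Claim_ definition above) =====
theorem getSandwich_spec : Claim_equal_getSandwich := by
  intro a _
  unfold Spec_getSandwich getSandwich getSandwich_alt
  by_cases hg : 5 < PySem.Str.len a ∧ PySem.Str.isIn "bread" a = true
  · rw [if_pos hg, if_pos hg]
    simp only [PySem.List.foldl_append_if_eq_filter, List.nil_append]
    rw [pvHead_eq a hg.2, pvLast_eq a hg.2]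
  · rw [if_neg hg, if_neg hg]
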